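-- pv_equiv track=rewrite | github.com/bryanHowell/cluster-classroom-kmodes | procasmt.py | combasmt
-- ===== SOURCE A (Python) =====
-- def combasmt(Xall):
--     '''combasmt combines all assessments into one cumulative assessment
--
--     Parameters:
--     Xall, data from all assessments
--
--     Returns:
--     Xcum, data concatentated across all dates
--     '''
--
--     # merging files into 1
--     Xcum = []  # preallocate
--     for ii in range(len(Xall)):
--         c0 = 0 if ii == 0 else 1
--         tmp = list(map(list, zip(*Xall[ii])))  # transpose current list
--         Xcum.extend(tmp[c0:])  # accumulate lists
--     Xcum = list(map(list, zip(*Xcum)))  # transpose (back) total list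
--
--     return Xcum
-- ===== SOURCE B (Python) =====
-- def combasmt(Xall):
--     '''Row-by-row rebuild: no transposes; each output row is the slices of the
--     corresponding input rows glued together.'''
--     segs = []  # (dataset, start col, width) for datasets that contribute columns
--     for ii, X in enumerate(Xall):
--         s = 0 if ii == 0 else 1
--         w = min(map(len, X)) if X else 0
--         if s < w:
--             segs.append((X, s, w))
--     if not segs:
--         return []
--     R = min(len(X) for X, _, _ in segs)
--     return [[v for X, s, w in segs for v in X[r][s:w]] for r in range(R)]
-- ===== Notes on version B (the rewrite author's own statement) =====
-- stated objective: alternative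
-- what changed: B drops both transposes and builds the result row-by-row: one pass records each dataset's contributing column range (start, min row width), then each output row is the concatenation of the corresponding row slices, instead of transposing every dataset, concatenating columns and transposing back.
import Mathlib
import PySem

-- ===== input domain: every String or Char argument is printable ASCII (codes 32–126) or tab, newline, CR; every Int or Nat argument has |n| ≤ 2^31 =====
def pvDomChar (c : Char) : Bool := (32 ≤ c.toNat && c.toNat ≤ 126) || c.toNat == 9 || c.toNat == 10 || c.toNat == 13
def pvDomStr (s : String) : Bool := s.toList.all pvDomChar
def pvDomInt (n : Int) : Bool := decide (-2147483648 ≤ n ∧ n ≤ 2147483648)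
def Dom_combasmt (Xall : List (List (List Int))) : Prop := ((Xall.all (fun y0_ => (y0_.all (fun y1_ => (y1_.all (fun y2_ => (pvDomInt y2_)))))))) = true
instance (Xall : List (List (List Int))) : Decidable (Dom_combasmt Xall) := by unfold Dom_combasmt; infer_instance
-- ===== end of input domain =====

-- B rebuilds the result row-by-row from per-dataset column ranges instead of
-- transposing every dataset and transposing back (objective: alternative decomposition).

-- min(map(len, xss)) for nonempty xss, 0 for [] : contract of Python's min over lengths
def pyMinLen {α : Type} : List (List α) → Nat
  | [] => 0
  | [x] => x.length
  | x :: y :: xs => min x.length (pyMinLen (y :: xs))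

-- ===== PORT A =====
-- list(map(list, zip(*xss))) : truncating transpose, the exact contract of Python's zip(*)
def pyTranspose (xss : List (List Int)) : List (List Int) :=
  (List.range (pyMinLen xss)).map (fun j => xss.map (fun xs => xs.getD j 0))

def combasmt (Xall : List (List (List Int))) : List (List Int) :=
  let Xcum := (List.range Xall.length).foldl
    (fun acc ii =>
      let c0 : Nat := if ii = 0 then 0 else 1
      let tmp := pyTranspose (Xall.getD ii [])
      acc ++ tmp.drop c0) []      -- tmp[c0:] with c0 ∈ {0,1}
  pyTranspose Xcum

-- ===== PORT B =====
def combasmt_alt (Xall : List (List (List Int))) : List (List Int) :=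
  let segs := (PySem.List.enumerate Xall 0).foldl
    (fun (acc : List (List (List Int) × Nat × Nat)) p =>
      let s : Nat := if p.1 = 0 then 0 else 1
      let w : Nat := pyMinLen p.2
      if s < w then acc ++ [(p.2, s, w)] else acc) []
  if segs = [] then []
  else
    let R := pyMinLen (segs.map (fun q => q.1))
    (List.range R).map (fun r =>
      segs.flatMap (fun q => ((q.1.getD r []).take q.2.2).drop q.2.1))  -- X[r][s:w]

-- ===== PRECONDITION & SPEC =====
def Spec_combasmt (Xall : List (List (List Int))) (out : List (List Int)) : Prop := out = combasmt_alt Xall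
instance (Xall : List (List (List Int))) (out : List (List Int)) : Decidable (Spec_combasmt Xall out) := by unfold Spec_combasmt; infer_instance

-- ===== CLAIM (what is proved, stated in full; the proofs are below) =====
def Claim_equal_combasmt : Prop := ∀ (Xall : List (List (List Int))), Dom_combasmt Xall → Spec_combasmt Xall (combasmt Xall)

-- ===== LEMMAS AND PROOFS =====

-- proof-side canonical forms
def blockOf (q : List (List Int) × Nat × Nat) : List (List Int) :=
  (pyTranspose q.1).drop q.2.1

def segsOf : List (List (List Int)) → List (List (List Int) × Nat × Nat)
  | [] => []
  | X :: rest =>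
      (if 0 < pyMinLen X then [(X, 0, pyMinLen X)] else []) ++
      (rest.filter (fun Y => decide (1 < pyMinLen Y))).map (fun Y => (Y, 1, pyMinLen Y))

def colsOf : List (List (List Int)) → List (List Int)
  | [] => []
  | X :: rest => pyTranspose X ++ rest.flatMap (fun Y => (pyTranspose Y).drop 1)

theorem pyMinLen_cons {α : Type} (x : List α) (xs : List (List α)) :
    pyMinLen (x :: xs) = if xs = [] then x.length else min x.length (pyMinLen xs) := by
  cases xs <;> simp [pyMinLen]

theorem pyMinLen_le_mem {α : Type} {X : List (List α)} {row : List α} (h : row ∈ X) :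
    pyMinLen X ≤ row.length := by
  induction X with
  | nil => simp at h
  | cons x xs ih =>
    rw [pyMinLen_cons]
    rcases List.mem_cons.1 h with rfl | h'
    · split <;> omega
    · have h1 := ih h'
      have h2 : xs ≠ [] := by rintro rfl; simp at h'
      simp only [h2, if_false]
      omega

theorem pyMinLen_append {α : Type} {as bs : List (List α)} (ha : as ≠ []) (hb : bs ≠ []) :
    pyMinLen (as ++ bs) = min (pyMinLen as) (pyMinLen bs) := by
  induction as with
  | nil => simp at ha
  | cons x xs ih =>
    rcases eq_or_ne xs [] with rfl | hxs
    · simp [pyMinLen_cons, hb]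
    · have hne : xs ++ bs ≠ [] := by simp [hxs]
      rw [List.cons_append, pyMinLen_cons, pyMinLen_cons, if_neg hne, if_neg hxs, ih hxs]
      omega

theorem pyMinLen_const {α : Type} {b : List (List α)} {L : Nat}
    (h : ∀ c ∈ b, c.length = L) (hne : b ≠ []) : pyMinLen b = L := by
  induction b with
  | nil => simp at hne
  | cons x xs ih =>
    rw [pyMinLen_cons]
    rcases eq_or_ne xs [] with rfl | hxs
    · simp [h x (by simp)]
    · rw [if_neg hxs, ih (fun c hc => h c (List.mem_cons_of_mem _ hc)) hxs, h x (by simp)]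
      omega

theorem length_pyTranspose (X : List (List Int)) : (pyTranspose X).length = pyMinLen X := by
  simp [pyTranspose]

theorem length_mem_pyTranspose {X : List (List Int)} {c : List Int}
    (h : c ∈ pyTranspose X) : c.length = X.length := by
  simp only [pyTranspose, List.mem_map, List.mem_range] at h
  obtain ⟨j, _, rfl⟩ := h
  simp

-- generic: flatMap over getD-indexed range is flatMap over the list
theorem flatMap_range_getD {α β : Type} (g : α → List β) (d : α) (l : List α) :
    (List.range l.length).flatMap (fun ii => g (l.getD ii d)) = l.flatMap g := by
  induction l with
  | nil => simp
  | cons x xs ih =>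
    rw [List.length_cons, List.range_succ_eq_map]
    simp only [List.flatMap_cons, List.flatMap_map]
    simp only [List.getD_cons_zero, List.getD_cons_succ]
    rw [ih]

theorem fmCongr {α β : Type} {l : List α} {f g : α → List β}
    (h : ∀ x ∈ l, f x = g x) : l.flatMap f = l.flatMap g := by
  induction l with
  | nil => rfl
  | cons x xs ih =>
    simp only [List.flatMap_cons]
    rw [h x (by simp), ih (fun y hy => h y (List.mem_cons_of_mem _ hy))]

-- A's foldl equals the canonical column list
theorem combasmt_eq_cols (Xall : List (List (List Int))) :
    combasmt Xall = pyTranspose (colsOf Xall) := by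
  show pyTranspose ((List.range Xall.length).foldl
    (fun acc ii => acc ++ (pyTranspose (Xall.getD ii [])).drop (if ii = 0 then 0 else 1)) [])
    = pyTranspose (colsOf Xall)
  rw [PySem.List.foldl_append_eq_flatMap]
  congr 1
  cases Xall with
  | nil => simp [colsOf]
  | cons X rest =>
    rw [List.length_cons, List.range_succ_eq_map, List.flatMap_cons, List.flatMap_map]
    simp only [List.getD_cons_zero, List.getD_cons_succ, List.nil_append]
    have hsucc : ∀ (a : Nat), (if a.succ = 0 then 0 else 1) = 1 := fun a => by simp
    simp only [if_true, List.drop_zero, hsucc, Nat.succ_eq_add_one]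
    rw [flatMap_range_getD (fun Y => (pyTranspose Y).drop 1) [] rest]
    rfl

-- B's foldl equals the canonical segment list
theorem segs_foldl (l : List (List (List Int))) (k : Int) (hk : 1 ≤ k)
    (acc : List (List (List Int) × Nat × Nat)) :
    (PySem.List.enumerate l k).foldl
      (fun (acc : List (List (List Int) × Nat × Nat)) p =>
        let s : Nat := if p.1 = 0 then 0 else 1
        let w : Nat := pyMinLen p.2
        if s < w then acc ++ [(p.2, s, w)] else acc) acc
    = acc ++ (l.filter (fun Y => decide (1 < pyMinLen Y))).map (fun Y => (Y, 1, pyMinLen Y)) := by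
  induction l generalizing k acc with
  | nil => simp [PySem.List.enumerate_nil]
  | cons X rest ih =>
    rw [PySem.List.enumerate_cons, List.foldl_cons]
    have hk0 : ¬ ((k, X).1 = 0) := by simp; omega
    simp only [hk0, if_false]
    by_cases hw : 1 < pyMinLen X
    · rw [if_pos hw, ih (k + 1) (by omega), List.filter_cons_of_pos (by simpa using hw)]
      simp
    · rw [if_neg hw, ih (k + 1) (by omega), List.filter_cons_of_neg (by simpa using hw)]

theorem segs_eq (Xall : List (List (List Int))) :
    (PySem.List.enumerate Xall 0).foldl
      (fun (acc : List (List (List Int) × Nat × Nat)) p =>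
        let s : Nat := if p.1 = 0 then 0 else 1
        let w : Nat := pyMinLen p.2
        if s < w then acc ++ [(p.2, s, w)] else acc) [] = segsOf Xall := by
  cases Xall with
  | nil => simp [PySem.List.enumerate_nil, segsOf]
  | cons X rest =>
    rw [PySem.List.enumerate_cons, List.foldl_cons]
    simp only [if_true, List.nil_append]
    by_cases hw : 0 < pyMinLen X
    · rw [if_pos hw, segs_foldl rest (0 + 1) (by norm_num)]
      simp [segsOf, hw]
    · rw [if_neg hw, segs_foldl rest (0 + 1) (by norm_num)]
      simp [segsOf, hw]

-- the columns are the concatenation of the segment blocks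
theorem tail_cols (rest : List (List (List Int))) :
    rest.flatMap (fun Y => (pyTranspose Y).drop 1)
      = ((rest.filter (fun Y => decide (1 < pyMinLen Y))).map
          (fun Y => (Y, 1, pyMinLen Y))).flatMap blockOf := by
  induction rest with
  | nil => rfl
  | cons Y ys ih =>
    by_cases h : 1 < pyMinLen Y
    · rw [List.flatMap_cons, List.filter_cons_of_pos (by simpa using h), List.map_cons,
        List.flatMap_cons, ih]
      rfl
    · rw [List.flatMap_cons, List.filter_cons_of_neg (by simpa using h), ih]
      have : (pyTranspose Y).drop 1 = [] :=
        List.drop_eq_nil_of_le (by rw [length_pyTranspose]; omega)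
      rw [this, List.nil_append]

theorem cols_eq_flatMap_blocks (Xall : List (List (List Int))) :
    colsOf Xall = (segsOf Xall).flatMap blockOf := by
  cases Xall with
  | nil => rfl
  | cons X rest =>
    show pyTranspose X ++ rest.flatMap (fun Y => (pyTranspose Y).drop 1) = _
    rw [segsOf, List.flatMap_append, tail_cols]
    congr 1
    by_cases hw : 0 < pyMinLen X
    · rw [if_pos hw]
      show _ = (pyTranspose X).drop 0 ++ []
      rw [List.drop_zero, List.append_nil]
    · rw [if_neg hw]
      have : pyTranspose X = [] := by
        have := length_pyTranspose X
        rw [List.eq_nil_iff_length_eq_zero]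
        omega
      rw [this]
      rfl

-- well-formedness of segsOf
theorem segsOf_wf {Xall : List (List (List Int))} {q : List (List Int) × Nat × Nat}
    (h : q ∈ segsOf Xall) : q.2.1 < q.2.2 ∧ q.2.2 = pyMinLen q.1 := by
  cases Xall with
  | nil => simp [segsOf] at h
  | cons X rest =>
    rw [segsOf] at h
    rcases List.mem_append.1 h with h1 | h2
    · split at h1
      · rw [List.mem_singleton] at h1
        subst h1
        exact ⟨by assumption, rfl⟩
      · simp at h1
    · obtain ⟨Y, hY, rfl⟩ := List.mem_map.1 h2
      have := (List.mem_filter.1 hY).2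
      simp at this
      exact ⟨this, rfl⟩

theorem blockOf_ne_nil {q : List (List Int) × Nat × Nat}
    (h1 : q.2.1 < q.2.2) (h2 : q.2.2 = pyMinLen q.1) : blockOf q ≠ [] := by
  have hl : (blockOf q).length = pyMinLen q.1 - q.2.1 := by
    simp [blockOf, length_pyTranspose]
  intro h
  rw [h] at hl
  simp at hl
  omega

theorem minlen_flatMap (segs : List (List (List Int) × Nat × Nat))
    (hwf : ∀ q ∈ segs, q.2.1 < q.2.2 ∧ q.2.2 = pyMinLen q.1) (hne : segs ≠ []) :
    pyMinLen (segs.flatMap blockOf) = pyMinLen (segs.map (fun q => q.1)) := by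
  induction segs with
  | nil => exact absurd rfl hne
  | cons q rest ih =>
    obtain ⟨h1, h2⟩ := hwf q (List.mem_cons_self)
    have hbq : blockOf q ≠ [] := blockOf_ne_nil h1 h2
    have hconst : pyMinLen (blockOf q) = q.1.length :=
      pyMinLen_const (fun c hc => length_mem_pyTranspose (List.mem_of_mem_drop hc)) hbq
    rcases eq_or_ne rest [] with rfl | hrest
    · simp only [List.flatMap_cons, List.flatMap_nil, List.append_nil, List.map_cons,
        List.map_nil]
      rw [hconst, pyMinLen_cons, if_pos rfl]
    · obtain ⟨q2, rest2, rfl⟩ := List.exists_cons_of_ne_nil hrest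
      obtain ⟨g1, g2⟩ := hwf q2 (List.mem_cons_of_mem _ (List.mem_cons_self))
      have hrb : (q2 :: rest2).flatMap blockOf ≠ [] := by
        rw [List.flatMap_cons]
        exact List.append_ne_nil_of_left_ne_nil (blockOf_ne_nil g1 g2) _
      rw [List.flatMap_cons, pyMinLen_append hbq hrb,
        ih (fun p hp => hwf p (List.mem_cons_of_mem _ hp)) hrest, hconst]
      conv_rhs => rw [List.map_cons]
      rw [pyMinLen_cons, if_neg (by simp)]

theorem row_map (X : List (List Int)) (s w : Nat) (h1 : s < w) (h2 : w = pyMinLen X)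
    {r : Nat} (hr : r < X.length) :
    ((pyTranspose X).drop s).map (fun c => c.getD r 0) = ((X.getD r []).take w).drop s := by
  have hrX : X.getD r [] = X[r] := List.getD_eq_getElem X [] hr
  have hrow : w ≤ (X.getD r []).length := by
    rw [hrX]
    exact h2 ▸ pyMinLen_le_mem (List.getElem_mem hr)
  apply List.ext_getElem
  · simp only [List.length_map, List.length_drop, length_pyTranspose, List.length_take]
    omega
  · intro k hk1 hk2
    simp only [List.length_map, List.length_drop, length_pyTranspose] at hk1
    have hsk : s + k < pyMinLen X := by omega
    rw [List.getElem_map, List.getElem_drop, List.getElem_drop, List.getElem_take]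
    have hT : (pyTranspose X)[s + k]'(by rw [length_pyTranspose]; omega)
        = X.map (fun xs => xs.getD (s + k) 0) := by
      simp [pyTranspose]
    have hrow' : w ≤ X[r].length := by rw [← hrX]; exact hrow
    rw [hT, List.getD_eq_getElem _ _ (by simpa using hr), List.getElem_map]
    simp only [hrX]
    rw [List.getD_eq_getElem _ _ (by omega)]

-- the main combinatorial step
theorem transpose_flatMap_blocks (segs : List (List (List Int) × Nat × Nat))
    (hwf : ∀ q ∈ segs, q.2.1 < q.2.2 ∧ q.2.2 = pyMinLen q.1) :
    pyTranspose (segs.flatMap blockOf) =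
      if segs = [] then []
      else (List.range (pyMinLen (segs.map (fun q => q.1)))).map
        (fun r => segs.flatMap (fun q => ((q.1.getD r []).take q.2.2).drop q.2.1)) := by
  rcases eq_or_ne segs [] with rfl | hne
  · simp [pyTranspose, pyMinLen]
  · rw [if_neg hne]
    show (List.range (pyMinLen (segs.flatMap blockOf))).map
        (fun r => (segs.flatMap blockOf).map (fun c => c.getD r 0)) = _
    rw [minlen_flatMap segs hwf hne]
    apply List.map_congr_left
    intro r hrmem
    have hr : r < pyMinLen (segs.map (fun q => q.1)) := List.mem_range.1 hrmem
    rw [List.map_flatMap]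
    apply fmCongr
    intro q hq
    obtain ⟨h1, h2⟩ := hwf q hq
    have hrq : r < q.1.length :=
      lt_of_lt_of_le hr (pyMinLen_le_mem (List.mem_map.2 ⟨q, hq, rfl⟩))
    exact row_map q.1 q.2.1 q.2.2 h1 h2 hrq

-- ===== VERDICT (by name: the statement is the Claim_ definition above) =====
theorem combasmt_spec : Claim_equal_combasmt := by
  intro Xall _
  unfold Spec_combasmt
  rw [combasmt_eq_cols, cols_eq_flatMap_blocks,
      transpose_flatMap_blocks _ (fun q hq => segsOf_wf hq)]
  conv_rhs => unfold combasmt_alt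
  rw [segs_eq]
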